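-- pv_equiv track=rewrite | github.com/mohitsainiknl/blender-addons | Custom Tools/custom_tools/common/rig/__init__.py | make_bone_name
-- ===== SOURCE A (Python) =====
-- def make_name(prefix, remove_prefix_list, name):
--     for r_prefix in remove_prefix_list:
--         if r_prefix != '':
--             is_found = True
--             for idx in range(len(r_prefix)):
--                 if name[idx].upper() != r_prefix[idx].upper():
--                     is_found = False
--                     break
--             if is_found:
--                 new_name = name[idx+1:]
--                 name = new_name
--                 break
--     return prefix + name
--
-- def make_bone_name(prefix, name, name_list, count=None):
--     remove_list = ['def_', 'tgt_', 'ndl_', 'ctl_', 'mech_', 'mch_', 'org_', 'rot_', 'prnt_', 'twk_', 'opp_']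
--     remove_list.append(prefix)
--     new_prefix = prefix + ((str(count) + '_') if count is not None else '')
--     new_name = make_name(new_prefix, remove_list, name)
--     if new_name.upper() in name_list:
--         if count is None:
--             count = 1
--         else:
--             count = count + 1
--         return make_bone_name(prefix, name, name_list, count)
--     else:
--         return new_name
-- ===== SOURCE B (Python) =====
-- def make_bone_name(prefix, name, name_list, count=None):
--     removers = ['def_', 'tgt_', 'ndl_', 'ctl_', 'mech_', 'mch_', 'org_',
--                 'rot_', 'prnt_', 'twk_', 'opp_', prefix]
--     # the stripped core does not depend on count, so compute it ONCE, outside the retry loop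
--     hit = next((r for r in removers
--                 if r and name.upper().startswith(r.upper())), None)
--     core = name if hit is None else name[len(hit):]
--     taken = set(name_list)
--     while True:
--         suffix = '' if count is None else str(count) + '_'
--         candidate = prefix + suffix + core
--         if candidate.upper() not in taken:
--             return candidate
--         count = 1 if count is None else count + 1
-- ===== Notes on version B (the rewrite author's own statement) =====
-- stated objective: alternative
-- what changed: B hoists the prefix-stripping out of the retry loop entirely: it computes the stripped core ONCE with a find-first-matching-prefix pass (case-insensitive startswith), builds each retry candidate by plain concatenation prefix+count_+core, and tests membership against a set built once from name_list, replacing A's recursion that re-runs the char-by-char strip on every retry.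
import Mathlib
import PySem

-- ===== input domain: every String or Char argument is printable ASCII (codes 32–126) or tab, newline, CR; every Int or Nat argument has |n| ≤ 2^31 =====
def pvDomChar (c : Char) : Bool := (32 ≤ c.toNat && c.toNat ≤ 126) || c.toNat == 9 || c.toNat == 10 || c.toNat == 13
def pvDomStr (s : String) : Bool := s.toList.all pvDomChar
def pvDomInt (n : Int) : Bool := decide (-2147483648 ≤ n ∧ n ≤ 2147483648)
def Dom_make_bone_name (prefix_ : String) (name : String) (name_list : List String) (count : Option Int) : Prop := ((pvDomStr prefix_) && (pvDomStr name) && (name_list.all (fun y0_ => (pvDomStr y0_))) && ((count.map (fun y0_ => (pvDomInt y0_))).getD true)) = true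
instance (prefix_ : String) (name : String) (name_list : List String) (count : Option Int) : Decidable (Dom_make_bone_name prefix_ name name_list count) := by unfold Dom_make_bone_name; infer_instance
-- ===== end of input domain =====

-- B hoists the prefix-stripping out of the retry loop (computed once, find-first pass), builds each
-- candidate by concatenation and tests a set built once from name_list; equal return values on Pre_
-- (the inputs where A does not raise IndexError).

-- ===== PORT A =====
-- inner loop of make_name: `for idx in range(len(r_prefix)): if name[idx].upper() != r_prefix[idx].upper(): is_found = False; break`
-- one char of r_prefix and of name per step; the `_ :: _, []` case is where Python's name[idx] raises IndexError (outside Pre_).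
def pvInnerA : List Char → List Char → Bool
  | [], _ => true
  | _ :: _, [] => false  -- IndexError in Python; Pre_make_bone_name excludes these inputs
  | r :: rs, c :: cs => if PySem.Chars.upperChar c = PySem.Chars.upperChar r then pvInnerA rs cs else false

-- outer loop of make_name: first non-empty matching prefix strips name[idx+1:] (idx = len(r_prefix)-1) and breaks
def pvStripA : List String → List Char → List Char
  | [], nameL => nameL
  | r :: rs, nameL =>
    if r ≠ "" then
      if pvInnerA r.toList nameL then
        PySem.List.slice nameL (some (((r.toList.length - 1 : Nat) : Int) + 1)) none  -- name[idx+1:]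
      else pvStripA rs nameL
    else pvStripA rs nameL

def pvMakeNameA (prefix_ : String) (rl : List String) (name : String) : String :=
  String.ofList (prefix_.toList ++ pvStripA rl name.toList)  -- return prefix + name

def pvRemoveListA (prefix_ : String) : List String :=
  ["def_", "tgt_", "ndl_", "ctl_", "mech_", "mch_", "org_", "rot_", "prnt_", "twk_", "opp_"] ++ [prefix_]

-- the recursion of A's make_bone_name; fuel only makes it total (name_list.length + 2 is never exhausted:
-- the candidate names of successive counts are pairwise distinct, so at most name_list.length retries collide)
def pvGoA (prefix_ name : String) (name_list : List String) : Option Int → Nat → String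
  | _, 0 => ""
  | count, Nat.succ fuel =>
    let new_prefix := String.ofList (prefix_.toList ++ (match count with
      | some c => PySem.Int.toChars c ++ ['_']
      | none => []))
    let new_name := pvMakeNameA new_prefix (pvRemoveListA prefix_) name
    if PySem.Str.upper new_name ∈ name_list then
      pvGoA prefix_ name name_list (some (match count with | none => (1 : Int) | some c => c + 1)) fuel
    else new_name

def make_bone_name (prefix_ : String) (name : String) (name_list : List String) (count : Option Int) : String :=
  pvGoA prefix_ name name_list count (name_list.length + 2)

-- ===== PORT B =====
-- Source B: `hit = next((r for r in removers if r and name.upper().startswith(r.upper())), None)` then one slice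
def pvCoreB (removers : List String) (nameL : List Char) : List Char :=
  match removers.find? (fun r => !(r == "") && PySem.Chars.startswith (PySem.Chars.upper nameL) (PySem.Chars.upper r.toList)) with
  | none => nameL                          -- core = name
  | some hit => nameL.drop hit.toList.length  -- core = name[len(hit):]

-- Source B's `while True` loop over count only: candidate = prefix + suffix + core, test against the set `taken`
def pvLoopB (prefixL coreL : List Char) (taken : PySem.Set String) : Option Int → Nat → String
  | _, 0 => ""
  | count, Nat.succ fuel =>
    let suffix := match count with | none => ([] : List Char) | some c => PySem.Int.toChars c ++ ['_']
    let candidate := String.ofList (prefixL ++ suffix ++ coreL)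
    if PySem.Str.upper candidate ∈ taken then
      pvLoopB prefixL coreL taken (some (match count with | none => (1 : Int) | some c => c + 1)) fuel
    else candidate

def make_bone_name_alt (prefix_ : String) (name : String) (name_list : List String) (count : Option Int) : String :=
  let removers := ["def_", "tgt_", "ndl_", "ctl_", "mech_", "mch_", "org_", "rot_", "prnt_", "twk_", "opp_", prefix_]
  let core := pvCoreB removers name.toList
  let taken := PySem.Set.ofList name_list
  pvLoopB prefix_.toList core taken count (name_list.length + 2)

-- ===== PRECONDITION & SPEC =====
def pvCIFull (nameL rL : List Char) : Bool :=
  (rL.map PySem.Chars.upperChar).isPrefixOf (nameL.map PySem.Chars.upperChar)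

def pvCIStrict (nameL rL : List Char) : Bool :=
  decide (nameL.length < rL.length) && (nameL.map PySem.Chars.upperChar).isPrefixOf (rL.map PySem.Chars.upperChar)

def pvStops (nameL : List Char) (r : String) : Bool :=
  !(r == "") && (pvCIFull nameL r.toList || pvCIStrict nameL r.toList)

def pvRemovers (prefix_ : String) : List String :=
  ["def_", "tgt_", "ndl_", "ctl_", "mech_", "mch_", "org_", "rot_", "prnt_", "twk_", "opp_", prefix_]

-- Pre_ excludes exactly the inputs where A raises IndexError: those where the first remove-list entry that is
-- case-insensitively comparable with name (a prefix of it, or a strict extension of it) is a strict extension.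
def Pre_make_bone_name (prefix_ : String) (name : String) (name_list : List String) (count : Option Int) : Prop :=
  ((pvRemovers prefix_).find? (pvStops name.toList)).all (fun r => pvCIFull name.toList r.toList) = true

instance (prefix_ : String) (name : String) (name_list : List String) (count : Option Int) : Decidable (Pre_make_bone_name prefix_ name name_list count) := by unfold Pre_make_bone_name; infer_instance

def pvWitness_make_bone_name : String × String × List String × Option Int := ("ctl_", "abc", ["X"], none)

def Spec_make_bone_name (prefix_ : String) (name : String) (name_list : List String) (count : Option Int) (out : String) : Prop := out = make_bone_name_alt prefix_ name name_list count
instance (prefix_ : String) (name : String) (name_list : List String) (count : Option Int) (out : String) : Decidable (Spec_make_bone_name prefix_ name name_list count out) := by unfold Spec_make_bone_name; infer_instance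

-- ===== CLAIM =====
def Claim_equal_make_bone_name : Prop := ∀ (prefix_ : String) (name : String) (name_list : List String) (count : Option Int), Dom_make_bone_name prefix_ name name_list count → Pre_make_bone_name prefix_ name name_list count → Spec_make_bone_name prefix_ name name_list count (make_bone_name prefix_ name name_list count)

-- ===== LEMMAS AND PROOFS =====

theorem pvWitness_ok : Dom_make_bone_name pvWitness_make_bone_name.1 pvWitness_make_bone_name.2.1 pvWitness_make_bone_name.2.2.1 pvWitness_make_bone_name.2.2.2 ∧ Pre_make_bone_name pvWitness_make_bone_name.1 pvWitness_make_bone_name.2.1 pvWitness_make_bone_name.2.2.1 pvWitness_make_bone_name.2.2.2 := by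
  decide

-- B's case-insensitive startswith test is exactly pvCIFull
theorem pvStarts_eq_full (nL : List Char) (r : String) :
    (!(r == "") && PySem.Chars.startswith (PySem.Chars.upper nL) (PySem.Chars.upper r.toList)) =
      (!(r == "") && pvCIFull nL r.toList) := by
  simp [PySem.Chars.startswith, PySem.Chars.upper, pvCIFull]

-- A's char-by-char loop agrees with case-insensitive isPrefixOf whenever name is not a strict
-- case-insensitive prefix of r (i.e. whenever the loop does not run off the end of name)
theorem pvInnerA_eq_isPrefixOf (rL : List Char) : ∀ nL : List Char, pvCIStrict nL rL = false →
    pvInnerA rL nL = (rL.map PySem.Chars.upperChar).isPrefixOf (nL.map PySem.Chars.upperChar) := by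
  induction rL with
  | nil => intro nL _; simp [pvInnerA]
  | cons r rs ih =>
    intro nL h
    cases nL with
    | nil => simp [pvCIStrict] at h
    | cons c cs =>
      simp only [pvInnerA, List.map_cons, List.isPrefixOf]
      by_cases hc : PySem.Chars.upperChar c = PySem.Chars.upperChar r
      · have hs : pvCIStrict cs rs = false := by
          simpa [pvCIStrict, hc, Nat.succ_lt_succ_iff] using h
        simp [hc, ih cs hs]
      · have hb : (PySem.Chars.upperChar r == PySem.Chars.upperChar c) = false :=
          beq_eq_false_iff_ne.mpr (fun e => hc e.symm)
        simp [hc, hb]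

-- A's strip loop and B's once-computed core agree, given that the first entry that stops A's scan is a full match
theorem pvStrip_eq_core (rl : List String) : ∀ nL : List Char,
    ((rl.find? (pvStops nL)).all (fun r => pvCIFull nL r.toList) = true) →
    pvStripA rl nL = pvCoreB rl nL := by
  induction rl with
  | nil => intro nL _; rfl
  | cons r rs ih =>
    intro nL h
    by_cases hr : r = ""
    · -- empty entry: A skips it, B's find? skips it
      have hstop : pvStops nL r = false := by simp [pvStops, hr]
      rw [List.find?_cons_of_neg (by simp [hstop])] at h
      subst hr
      simp only [pvStripA, pvCoreB, List.find?_cons]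
      rw [if_neg (by simp)]
      simpa [pvCoreB] using ih nL h
    · by_cases hfull : pvCIFull nL r.toList = true
      · -- full case-insensitive match: A's loop succeeds and strips, B's find? returns r
        have hlen : r.toList.length ≤ nL.length := by
          have hp := (List.isPrefixOf_iff_prefix.mp hfull).length_le
          simp only [List.length_map] at hp
          exact hp
        have hst : pvCIStrict nL r.toList = false := by
          unfold pvCIStrict
          rw [decide_eq_false (by omega : ¬ nL.length < r.toList.length)]
          rfl
        have hinner : pvInnerA r.toList nL = true := by
          rw [pvInnerA_eq_isPrefixOf _ _ hst]; exact hfull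
        have hpos : 1 ≤ r.toList.length := by
          rcases hrl : r.toList with _ | ⟨a, as⟩
          · exact absurd (by simpa using congrArg String.ofList hrl) hr
          · simp
        have hcast : (((r.toList.length - 1 : Nat) : Int) + 1) = ((r.toList.length : Nat) : Int) := by
          omega
        have hfind : (r :: rs).find? (fun r => !(r == "") && PySem.Chars.startswith (PySem.Chars.upper nL) (PySem.Chars.upper r.toList)) = some r := by
          apply List.find?_cons_of_pos
          rw [pvStarts_eq_full]
          simp [hr, hfull]
        simp only [pvStripA, pvCoreB, hfind]
        rw [if_pos hr, if_pos hinner, hcast, PySem.List.slice_from_natCast]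
      · -- no match for this entry: A's loop finds a mismatch, B's find? predicate is false; both move on
        have hfull' : pvCIFull nL r.toList = false := eq_false_of_ne_true hfull
        have hst : pvCIStrict nL r.toList = false := by
          by_contra hx
          have hx' : pvCIStrict nL r.toList = true := by
            cases hb : pvCIStrict nL r.toList with
            | false => exact absurd hb hx
            | true => rfl
          have hs : pvStops nL r = true := by simp [pvStops, hr, hx']
          rw [List.find?_cons_of_pos hs] at h
          exact hfull (by simpa using h)
        have hstop : pvStops nL r = false := by simp [pvStops, hst, hfull']
        have hinner : pvInnerA r.toList nL = false := by
          rw [pvInnerA_eq_isPrefixOf _ _ hst]; exact hfull'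
        have hpred : (!(r == "") && PySem.Chars.startswith (PySem.Chars.upper nL) (PySem.Chars.upper r.toList)) = false := by
          rw [pvStarts_eq_full]; simp [hfull']
        simp only [pvStripA, pvCoreB, List.find?_cons, hpred]
        rw [if_pos hr, if_neg (by simp [hinner])]
        simpa [pvCoreB] using ih nL (by rwa [List.find?_cons_of_neg (by simp [hstop])] at h)

-- A's recursion and B's loop run in lock-step: each of A's retries recomputes the same stripped tail
theorem pvGo_eq_loop (prefix_ name : String) (name_list : List String)
    (h : ((pvRemovers prefix_).find? (pvStops name.toList)).all (fun r => pvCIFull name.toList r.toList) = true) :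
    ∀ (fuel : Nat) (count : Option Int),
      pvGoA prefix_ name name_list count fuel =
        pvLoopB prefix_.toList (pvCoreB (pvRemovers prefix_) name.toList) (PySem.Set.ofList name_list) count fuel := by
  intro fuel
  induction fuel with
  | zero => intro count; rfl
  | succ fuel ih =>
    intro count
    have hrl : pvRemoveListA prefix_ = pvRemovers prefix_ := rfl
    have hstrip : pvStripA (pvRemoveListA prefix_) name.toList = pvCoreB (pvRemovers prefix_) name.toList := by
      rw [hrl]; exact pvStrip_eq_core _ _ h
    have hname : ∀ tag : List Char,
        pvMakeNameA (String.ofList (prefix_.toList ++ tag)) (pvRemoveListA prefix_) name =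
          String.ofList (prefix_.toList ++ tag ++ pvCoreB (pvRemovers prefix_) name.toList) := by
      intro tag
      simp [pvMakeNameA, hstrip, List.append_assoc]
    simp only [pvGoA, pvLoopB, hname, List.append_assoc]
    cases count with
    | none =>
      by_cases hm : PySem.Str.upper (String.ofList (prefix_.toList ++ ([] ++ pvCoreB (pvRemovers prefix_) name.toList))) ∈ name_list
      · rw [if_pos (by simpa using hm), if_pos (by simp [PySem.Set.mem_ofList]; simpa using hm)]
        exact ih _
      · rw [if_neg (by simpa using hm), if_neg (by simp [PySem.Set.mem_ofList]; simpa using hm)]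
    | some c =>
      by_cases hm : PySem.Str.upper (String.ofList (prefix_.toList ++ ((PySem.Int.toChars c ++ ['_']) ++ pvCoreB (pvRemovers prefix_) name.toList))) ∈ name_list
      · rw [if_pos (by simpa [List.append_assoc] using hm), if_pos (by simp [PySem.Set.mem_ofList]; simpa [List.append_assoc] using hm)]
        exact ih _
      · rw [if_neg (by simpa [List.append_assoc] using hm), if_neg (by simp [PySem.Set.mem_ofList]; simpa [List.append_assoc] using hm)]

-- ===== VERDICT =====
theorem make_bone_name_spec : Claim_equal_make_bone_name := by
  intro prefix_ name name_list count _ hpre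
  unfold Spec_make_bone_name make_bone_name make_bone_name_alt
  exact pvGo_eq_loop prefix_ name name_list hpre _ count
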